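-- pv_equiv track=rewrite | github.com/zapplea/emnlp_baseline | DATAprocess/BBNprocess/mc_generator.py | getAllCandidatesFromSentence
-- ===== SOURCE A (Python) =====
-- def getAllCandidatesFromSentence(labels, ignoreLabels):
--     """
--     Internal method to retrieve all positive candidates from the dataset
--
--
--     :param labels: Dataset labels, array of sentence labels
--     :param ignoreLabels: Labels that shouldn't be considered positive. ie : OTHER and PAD
--     :return: Returns tuple of format (start_index, end_index, label)
--     """
--
--     start_index = -1
--     candidate_label = None
--
--     candidates = []
--
--     for index, label in enumerate(labels + ['#EOS#']):  # Added an end of sentence label in case candidate is at the EOS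
--         if candidate_label is None:
--             if label not in ignoreLabels:
--                 candidate_label = label
--                 start_index = index
--         else:
--             if not label == candidate_label:
--                 end_index = index
--
--                 candidates.append((start_index, end_index, candidate_label))
--
--                 candidate_label = None
--
--                 # To check for back to back candidates
--                 if label not in ignoreLabels:
--                     candidate_label = label
--                     start_index = index
--
--
--     return candidates
-- ===== SOURCE B (Python) =====
-- def getAllCandidatesFromSentence(labels, ignoreLabels):
--     # Two-pass: run-length encode labels + sentinel, drop the final (never-closed) run,
--     # then emit one span per non-ignored run with a running start index.
--     seq = labels + ['#EOS#']
--     runs = []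
--     for lab in seq:
--         if runs and runs[-1][0] == lab:
--             runs[-1] = (lab, runs[-1][1] + 1)
--         else:
--             runs.append((lab, 1))
--     out = []
--     i = 0
--     for lab, n in runs[:-1]:
--         if lab not in ignoreLabels:
--             out.append((i, i + n, lab))
--         i += n
--     return out
-- ===== Notes on version B (the rewrite author's own statement) =====
-- stated objective: alternative
-- what changed: Replaced the single-pass candidate_label/None state machine by a two-pass decomposition: run-length encode labels+['#EOS#'], drop the final never-closed run, then emit one (start, start+len, label) span per non-ignored run with a running index.
import Mathlib
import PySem

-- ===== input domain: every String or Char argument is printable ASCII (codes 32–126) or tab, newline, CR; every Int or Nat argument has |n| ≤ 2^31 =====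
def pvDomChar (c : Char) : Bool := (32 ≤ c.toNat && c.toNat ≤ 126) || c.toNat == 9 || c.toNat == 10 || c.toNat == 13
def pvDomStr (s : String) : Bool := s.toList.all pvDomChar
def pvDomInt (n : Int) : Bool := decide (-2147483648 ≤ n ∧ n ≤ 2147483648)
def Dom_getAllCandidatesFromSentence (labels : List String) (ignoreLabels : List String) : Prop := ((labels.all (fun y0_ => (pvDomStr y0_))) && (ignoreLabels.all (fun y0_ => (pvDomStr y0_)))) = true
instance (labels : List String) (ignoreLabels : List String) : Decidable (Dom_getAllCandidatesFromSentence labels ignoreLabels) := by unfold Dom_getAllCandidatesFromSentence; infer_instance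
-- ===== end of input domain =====

-- B replaces A's candidate_label/None state machine by run-length encoding + per-run emission (same result, alternative decomposition).

-- ===== PORT A =====
-- one loop iteration of A (state = (start_index, candidate_label, candidates))
def pvStepA (ignoreLabels : List String)
    (st : Int × Option String × List (Int × Int × String)) (p : Int × String) :
    Int × Option String × List (Int × Int × String) :=
  let start_index := st.1
  let candidate_label := st.2.1
  let candidates := st.2.2
  let index := p.1
  let label := p.2
  match candidate_label with
  | none =>
      if label ∈ ignoreLabels then st
      else (index, some label, candidates)
  | some cl =>
      if ¬ (label = cl) then
        let end_index := index
        let candidates := candidates ++ [(start_index, end_index, cl)]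
        if label ∈ ignoreLabels then (start_index, none, candidates)
        else (index, some label, candidates)
      else st

def getAllCandidatesFromSentence (labels : List String) (ignoreLabels : List String) : List (Int × Int × String) :=
  let st := (PySem.List.enumerate (labels ++ ["#EOS#"]) 0).foldl (pvStepA ignoreLabels)
              (-1, none, [])
  st.2.2

-- ===== PORT B =====
-- Source B's run builder: runs kept in REVERSE order during the fold so that Python's runs[-1]
-- is the head; reversed once at the end (exact).
def pvStepB (racc : List (String × Int)) (lab : String) : List (String × Int) :=
  match racc with
  | (l, n) :: t => if l = lab then (lab, n + 1) :: t else (lab, 1) :: (l, n) :: t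
  | [] => [(lab, 1)]

def pvRunsB (seq : List String) : List (String × Int) :=
  (seq.foldl pvStepB []).reverse

-- Source B's emission loop (state = (i, out))
def pvStepE (ignoreLabels : List String)
    (st : Int × List (Int × Int × String)) (r : String × Int) :
    Int × List (Int × Int × String) :=
  let i := st.1
  let out := st.2
  let lab := r.1
  let n := r.2
  (i + n, if lab ∈ ignoreLabels then out else out ++ [(i, i + n, lab)])

def getAllCandidatesFromSentence_alt (labels : List String) (ignoreLabels : List String) : List (Int × Int × String) :=
  let runs := pvRunsB (labels ++ ["#EOS#"])
  let fin := runs.dropLast.foldl (pvStepE ignoreLabels) (0, [])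
  fin.2

-- ===== PRECONDITION & SPEC =====
def Spec_getAllCandidatesFromSentence (labels : List String) (ignoreLabels : List String) (out : List (Int × Int × String)) : Prop := out = getAllCandidatesFromSentence_alt labels ignoreLabels
instance (labels : List String) (ignoreLabels : List String) (out : List (Int × Int × String)) : Decidable (Spec_getAllCandidatesFromSentence labels ignoreLabels out) := by unfold Spec_getAllCandidatesFromSentence; infer_instance

-- ===== CLAIM (what is proved, stated in full; the proofs are below) =====
def Claim_equal_getAllCandidatesFromSentence : Prop := ∀ (labels : List String) (ignoreLabels : List String), Dom_getAllCandidatesFromSentence labels ignoreLabels → Spec_getAllCandidatesFromSentence labels ignoreLabels (getAllCandidatesFromSentence labels ignoreLabels)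

-- ===== LEMMAS AND PROOFS =====

-- canonical run-length encoding, consuming one maximal run per step
def pvRuns : List String → List (String × Int)
  | [] => []
  | l :: rest =>
      (l, ((rest.takeWhile (fun y => l = y)).length : Int) + 1) ::
        pvRuns (rest.dropWhile (fun y => l = y))
termination_by seq => seq.length
decreasing_by
  simp only [List.length_cons]
  exact Nat.lt_succ_of_le (List.length_dropWhile_le _ _)

-- canonical emission over a run list
def pvEmit (ign : List String) : Int → List (String × Int) → List (Int × Int × String)
  | _, [] => []
  | i, (lab, n) :: rest =>
      (if lab ∈ ign then [] else [(i, i + n, lab)]) ++ pvEmit ign (i + n) rest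

lemma pvRuns_cons (l : String) (rest : List String) :
    pvRuns (l :: rest) =
      (l, ((rest.takeWhile (fun y => l = y)).length : Int) + 1) ::
        pvRuns (rest.dropWhile (fun y => l = y)) := by
  rw [pvRuns]

lemma pvRuns_ne_nil (l : String) (rest : List String) : pvRuns (l :: rest) ≠ [] := by
  rw [pvRuns_cons]; simp

-- B's fold builds exactly the reversed canonical runs
lemma stepB_inv : ∀ (seq : List String) (l : String) (n : Int) (t : List (String × Int)),
    seq.foldl pvStepB ((l, n) :: t) =
      (pvRuns (seq.dropWhile (fun y => l = y))).reverse ++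
        [(l, n + ((seq.takeWhile (fun y => l = y)).length : Int))] ++ t := by
  intro seq
  induction seq with
  | nil => intro l n t; simp [pvRuns]
  | cons x rest ih =>
      intro l n t
      by_cases h : l = x
      · subst h
        simp only [List.foldl_cons, pvStepB, List.takeWhile_cons, List.dropWhile_cons,
          decide_true, if_true]
        rw [ih]
        have harith : n + 1 + ((rest.takeWhile (fun y => l = y)).length : Int)
             = n + (((rest.takeWhile (fun y => l = y)).length : Int) + 1) := by ring
        simp [harith]
      · simp only [List.foldl_cons, pvStepB, List.takeWhile_cons, List.dropWhile_cons,
          decide_eq_true_eq, h, if_false]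
        rw [ih, pvRuns_cons]
        have harith : (1 : Int) + ((rest.takeWhile (fun y => x = y)).length : Int)
             = ((rest.takeWhile (fun y => x = y)).length : Int) + 1 := by ring
        simp [harith]

lemma pvRunsB_eq (seq : List String) : pvRunsB seq = pvRuns seq := by
  cases seq with
  | nil => simp [pvRunsB, pvRuns]
  | cons x rest =>
      unfold pvRunsB
      simp only [List.foldl_cons, pvStepB, stepB_inv, pvRuns_cons]
      simp
      omega

-- B's emission fold is the canonical emission
lemma stepE_inv (ign : List String) : ∀ (rs : List (String × Int)) (i : Int) (out : List (Int × Int × String)),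
    (rs.foldl (pvStepE ign) (i, out)).2 = out ++ pvEmit ign i rs := by
  intro rs
  induction rs with
  | nil => intro i out; simp [pvEmit]
  | cons r rest ih =>
      intro i out
      obtain ⟨lab, n⟩ := r
      simp only [List.foldl_cons, pvStepE, pvEmit, ih]
      by_cases h : lab ∈ ign <;> simp [h]

-- skipping one ignored label on A's side matches merging it into the head run on B's side
lemma emit_skip_ign (ign : List String) (x : String) (hx : x ∈ ign) :
    ∀ (rest : List String) (i : Int),
      pvEmit ign i (pvRuns (x :: rest)).dropLast
        = pvEmit ign (i + 1) (pvRuns rest).dropLast := by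
  intro rest i
  cases rest with
  | nil => simp [pvRuns_cons, pvRuns, pvEmit]
  | cons y rest2 =>
      by_cases h : x = y
      · subst h
        rw [pvRuns_cons, pvRuns_cons]
        simp only [List.takeWhile_cons, List.dropWhile_cons, decide_true, if_true,
          List.length_cons]
        cases htail : pvRuns (rest2.dropWhile (fun z => x = z)) with
        | nil => simp [pvEmit]
        | cons r rs =>
            simp only [List.dropLast_cons₂, pvEmit, if_pos hx, List.nil_append]
            congr 1
            push_cast
            ring
      · rw [pvRuns_cons (l := x)]
        simp only [List.takeWhile_cons, List.dropWhile_cons, decide_eq_true_eq, h, if_false,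
          List.length_nil, Nat.cast_zero, zero_add]
        cases htail : pvRuns (y :: rest2) with
        | nil => exact absurd htail (pvRuns_ne_nil _ _)
        | cons r rs => simp [List.dropLast_cons₂, pvEmit, hx]

-- the main invariant: A's fold from a closed (none) or open (some cl) state
lemma mainA (ign : List String) : ∀ (seq : List String),
    (∀ (i s : Int) (acc : List (Int × Int × String)),
      ((PySem.List.enumerate seq i).foldl (pvStepA ign) (s, none, acc)).2.2
        = acc ++ pvEmit ign i (pvRuns seq).dropLast) ∧
    (∀ (i s : Int) (cl : String) (acc : List (Int × Int × String)),
      ((PySem.List.enumerate seq i).foldl (pvStepA ign) (s, some cl, acc)).2.2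
        = if seq.dropWhile (fun y => cl = y) = [] then acc
          else acc ++ (s, i + ((seq.takeWhile (fun y => cl = y)).length : Int), cl) ::
            pvEmit ign (i + ((seq.takeWhile (fun y => cl = y)).length : Int))
              (pvRuns (seq.dropWhile (fun y => cl = y))).dropLast) := by
  intro seq
  induction seq with
  | nil =>
      constructor
      · intro i s acc; simp [PySem.List.enumerate, pvRuns, pvEmit]
      · intro i s cl acc; simp [PySem.List.enumerate]
  | cons x rest ih =>
      obtain ⟨ihn, iho⟩ := ih
      constructor
      · -- closed state
        intro i s acc
        rw [PySem.List.enumerate_cons, List.foldl_cons]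
        by_cases hx : x ∈ ign
        · rw [show pvStepA ign (s, none, acc) (i, x) = (s, none, acc) from by
            simp [pvStepA, hx]]
          rw [ihn (i + 1) s acc, emit_skip_ign ign x hx rest i]
        · rw [show pvStepA ign (s, none, acc) (i, x) = (i, some x, acc) from by
            simp [pvStepA, hx]]
          rw [iho (i + 1) i x acc, pvRuns_cons (l := x)]
          by_cases hrest : rest.dropWhile (fun y => x = y) = []
          · simp [hrest, pvRuns, pvEmit]
          · cases htail : pvRuns (rest.dropWhile (fun y => x = y)) with
            | nil =>
                obtain ⟨a, b, hab⟩ : ∃ a b, rest.dropWhile (fun y => x = y) = a :: b := by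
                  cases hr : rest.dropWhile (fun y => x = y) with
                  | nil => exact absurd hr hrest
                  | cons a b => exact ⟨a, b, rfl⟩
                rw [hab] at htail
                exact absurd htail (pvRuns_ne_nil a b)
            | cons r rs =>
                simp only [hrest, if_false, List.dropLast_cons₂, pvEmit, if_neg hx]
                have harith : i + 1 + ((rest.takeWhile (fun y => x = y)).length : Int)
                     = i + (((rest.takeWhile (fun y => x = y)).length : Int) + 1) := by ring
                simp [harith]
      · -- open state with candidate cl started at s
        intro i s cl acc
        rw [PySem.List.enumerate_cons, List.foldl_cons]
        by_cases hcl : cl = x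
        · subst hcl
          rw [show pvStepA ign (s, some cl, acc) (i, cl) = (s, some cl, acc) from by
            simp [pvStepA]]
          rw [iho (i + 1) s cl acc]
          simp only [List.dropWhile_cons, List.takeWhile_cons, decide_true, if_true,
            List.length_cons]
          by_cases hrest : rest.dropWhile (fun y => cl = y) = []
          · simp [hrest]
          · have harith : i + 1 + ((rest.takeWhile (fun y => cl = y)).length : Int)
                 = i + (((rest.takeWhile (fun y => cl = y)).length : Int) + 1) := by ring
            simp [hrest, harith]
        · have hne : ¬ (x = cl) := fun hh => hcl hh.symm
          rw [show pvStepA ign (s, some cl, acc) (i, x)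
              = (if x ∈ ign then (s, none, acc ++ [(s, i, cl)])
                 else (i, some x, acc ++ [(s, i, cl)])) from by
            simp [pvStepA, hne]]
          simp only [List.dropWhile_cons, List.takeWhile_cons, decide_eq_true_eq, hcl, if_false,
            List.length_nil, Nat.cast_zero, add_zero]
          by_cases hx : x ∈ ign
          · rw [if_pos hx, ihn (i + 1) s (acc ++ [(s, i, cl)]),
              ← emit_skip_ign ign x hx rest i]
            simp [List.cons_ne_nil]
          · rw [if_neg hx, iho (i + 1) i x (acc ++ [(s, i, cl)]), pvRuns_cons (l := x)]
            by_cases hrest : rest.dropWhile (fun y => x = y) = []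
            · simp [hrest, pvRuns, pvEmit, List.cons_ne_nil]
            · cases htail : pvRuns (rest.dropWhile (fun y => x = y)) with
              | nil =>
                  obtain ⟨a, b, hab⟩ : ∃ a b, rest.dropWhile (fun y => x = y) = a :: b := by
                    cases hr : rest.dropWhile (fun y => x = y) with
                    | nil => exact absurd hr hrest
                    | cons a b => exact ⟨a, b, rfl⟩
                  rw [hab] at htail
                  exact absurd htail (pvRuns_ne_nil a b)
              | cons r rs =>
                  simp only [hrest, if_false, List.dropLast_cons₂, pvEmit, if_neg hx,
                    List.cons_ne_nil]
                  have harith : i + 1 + ((rest.takeWhile (fun y => x = y)).length : Int)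
                       = i + (((rest.takeWhile (fun y => x = y)).length : Int) + 1) := by ring
                  simp [harith]

-- ===== VERDICT (by name: the statement is the Claim_ definition above) =====
theorem getAllCandidatesFromSentence_spec : Claim_equal_getAllCandidatesFromSentence := by
  intro labels ignoreLabels _
  unfold Spec_getAllCandidatesFromSentence getAllCandidatesFromSentence getAllCandidatesFromSentence_alt
  rw [pvRunsB_eq, stepE_inv]
  simpa using (mainA ignoreLabels (labels ++ ["#EOS#"])).1 0 (-1) []
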